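-- pv_equiv track=rewrite | github.com/Deltams/dm-tasks | task3/task3.py | check_vector
-- ===== SOURCE A (Python) =====
-- def what_degree_two(number): # В какую степень двойки возведено число; -1: не является степенью двойки
--     tmp = 1
--     ans = 0
--     while tmp < number:
--         tmp *= 2
--         ans += 1
--     if number == tmp:
--         return ans
--     else:
--         return -1
--
-- def check_vector(vec):
--     if len(vec) < 1:
--         return False
--     if what_degree_two(len(vec)) == -1:
--         return False
--     for char in vec:
--         if "0"<= char <= "1":
--             continue
--         return False
--     return True
-- ===== SOURCE B (Python) =====
-- def check_vector(vec):
--     n = len(vec)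
--     return n >= 1 and (n & (n - 1)) == 0 and all(c in "01" for c in vec)
-- ===== Notes on version B (the rewrite author's own statement) =====
-- stated objective: simpler
-- what changed: Replaces the iterative doubling helper what_degree_two with the closed-form bit test n & (n-1) == 0 and folds the character loop into a single all() expression.
import Mathlib
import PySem

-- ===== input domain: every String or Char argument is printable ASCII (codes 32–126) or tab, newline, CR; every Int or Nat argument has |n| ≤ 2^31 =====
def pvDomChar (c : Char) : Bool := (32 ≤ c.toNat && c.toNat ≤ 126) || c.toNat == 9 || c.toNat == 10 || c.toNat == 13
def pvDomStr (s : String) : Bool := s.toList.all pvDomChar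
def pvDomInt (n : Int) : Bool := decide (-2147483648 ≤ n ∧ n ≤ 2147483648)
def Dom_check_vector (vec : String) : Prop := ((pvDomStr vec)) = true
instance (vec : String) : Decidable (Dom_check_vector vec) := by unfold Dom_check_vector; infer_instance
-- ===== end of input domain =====

-- B replaces the iterative doubling helper by the closed-form bit test n & (n-1) == 0
-- and folds the character loop into a single all(); objective: simpler.

-- ===== PORT A =====
-- the `while tmp < number` loop of what_degree_two; fuel `number+1` is enough since
-- tmp doubles from 1 (proved below, the fuel-0 branch mirrors the post-loop code)
def wdtGo (number : Nat) : Nat → Nat → Int → Int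
  | 0, tmp, ans => if number = tmp then ans else -1
  | f + 1, tmp, ans =>
      if tmp < number then wdtGo number f (tmp * 2) (ans + 1)
      else if number = tmp then ans else -1

def what_degree_two (number : Nat) : Int := wdtGo number (number + 1) 1 0

-- the `for char in vec` loop with its early `return False`
def checkChars : List Char → Bool
  | [] => true
  | c :: rest => if '0' ≤ c ∧ c ≤ '1' then checkChars rest else false

def check_vector (vec : String) : Bool :=
  let n := vec.toList.length
  if n < 1 then false
  else if what_degree_two n = -1 then false
  else checkChars vec.toList

-- ===== PORT B =====
def check_vector_alt (vec : String) : Bool :=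
  let n := vec.toList.length
  decide (1 ≤ n) && (n &&& (n - 1) == 0) && vec.toList.all (fun c => c == '0' || c == '1')

-- ===== PRECONDITION & SPEC =====
def Spec_check_vector (vec : String) (out : Bool) : Prop := out = check_vector_alt vec
instance (vec : String) (out : Bool) : Decidable (Spec_check_vector vec out) := by unfold Spec_check_vector; infer_instance

-- ===== CLAIM (what is proved, stated in full; the proofs are below) =====
def Claim_equal_check_vector : Prop := ∀ (vec : String), Dom_check_vector vec → Spec_check_vector vec (check_vector vec)

-- ===== LEMMAS AND PROOFS =====

theorem land_odd_even (m : Nat) : (2 * m + 1) &&& (2 * m) = 2 * m := by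
  have h := Nat.land_bit true m false m
  simpa [Nat.bit_val, Nat.and_self] using h

theorem land_even_pred (m : Nat) : (2 * m) &&& (2 * (m - 1) + 1) = 2 * (m &&& (m - 1)) := by
  have h := Nat.land_bit false m true (m - 1)
  simpa [Nat.bit_val] using h

-- the bit trick: for n ≥ 1, n & (n-1) = 0 iff n is a power of two
theorem land_pred_eq_zero_iff : ∀ n : Nat, 1 ≤ n → ((n &&& (n - 1) = 0) ↔ ∃ k, n = 2 ^ k) := by
  intro n
  induction n using Nat.strong_induction_on with
  | _ n ih =>
    intro hn
    rcases Nat.even_or_odd n with ⟨m, hm⟩ | ⟨m, hm⟩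
    · -- n = 2m, m ≥ 1
      subst hm
      have hm1 : 1 ≤ m := by omega
      rw [show m + m = 2 * m from by omega,
          show 2 * m - 1 = 2 * (m - 1) + 1 from by omega, land_even_pred]
      have := ih m (by omega) hm1
      constructor
      · rintro h0
        have : m &&& (m - 1) = 0 := by omega
        obtain ⟨k, hk⟩ := (ih m (by omega) hm1).mp this
        exact ⟨k + 1, by rw [hk]; ring⟩
      · rintro ⟨k, hk⟩
        match k with
        | 0 => omega
        | k + 1 =>
          have hmk : m = 2 ^ k := by
            have : 2 * m = 2 * 2 ^ k := by rw [hk, pow_succ]; ring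
            omega
          have : m &&& (m - 1) = 0 := (ih m (by omega) hm1).mpr ⟨k, hmk⟩
          omega
    · -- n = 2m+1, odd
      subst hm
      have h1 : 2 * m + 1 - 1 = 2 * m := by omega
      rw [h1, land_odd_even]
      constructor
      · intro h0
        exact ⟨0, by omega⟩
      · rintro ⟨k, hk⟩
        match k with
        | 0 => omega
        | k + 1 =>
          exfalso
          have : 2 * m + 1 = 2 * 2 ^ k := by rw [hk]; ring
          omega

-- the loop of what_degree_two returns -1 exactly when number is not 2^k for any k ≥ j,
-- starting from tmp = 2^j with enough fuel
theorem wdtGo_spec (number : Nat) :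
    ∀ (fuel j : Nat) (ans : Int), 0 ≤ ans → number ≤ 2 ^ j + fuel →
      ((wdtGo number fuel (2 ^ j) ans = -1) ↔ ¬ ∃ k, j ≤ k ∧ number = 2 ^ k) := by
  intro fuel
  induction fuel with
  | zero =>
    intro j ans hans hle
    simp only [wdtGo]
    constructor
    · intro h
      rintro ⟨k, hjk, hk⟩
      have h2 : (2:Nat) ^ j ≤ 2 ^ k := Nat.pow_le_pow_right (by norm_num) hjk
      have : number = 2 ^ j := by omega
      rw [if_pos this] at h
      omega
    · intro h
      have hne : number ≠ 2 ^ j := by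
        intro he
        exact h ⟨j, le_refl j, he⟩
      rw [if_neg hne]
  | succ f ihf =>
    intro j ans hans hle
    simp only [wdtGo]
    by_cases hlt : 2 ^ j < number
    · rw [if_pos hlt]
      have hpow : 2 ^ j * 2 = 2 ^ (j + 1) := by rw [Nat.pow_succ]
      rw [hpow]
      have hle' : number ≤ 2 ^ (j + 1) + f := by
        have h1 : 1 ≤ 2 ^ j := Nat.one_le_two_pow
        have : 2 ^ (j + 1) = 2 ^ j + 2 ^ j := by rw [Nat.pow_succ]; ring
        omega
      rw [ihf (j + 1) (ans + 1) (by omega) hle']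
      constructor
      · intro h
        rintro ⟨k, hjk, hk⟩
        apply h
        refine ⟨k, ?_, hk⟩
        rcases Nat.lt_or_ge j k with hc | hc
        · omega
        · exfalso
          have : (2:Nat) ^ k ≤ 2 ^ j := Nat.pow_le_pow_right (by norm_num) hc
          omega
      · intro h
        rintro ⟨k, hjk, hk⟩
        exact h ⟨k, by omega, hk⟩
    · rw [if_neg hlt]
      push_neg at hlt
      constructor
      · intro h
        rintro ⟨k, hjk, hk⟩
        have h2 : (2:Nat) ^ j ≤ 2 ^ k := Nat.pow_le_pow_right (by norm_num) hjk
        have : number = 2 ^ j := by omega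
        rw [if_pos this] at h
        omega
      · intro h
        have hne : number ≠ 2 ^ j := by
          intro he
          exact h ⟨j, le_refl j, he⟩
        rw [if_neg hne]

theorem what_degree_two_eq_neg_one_iff (n : Nat) :
    (what_degree_two n = -1) ↔ ¬ ∃ k, n = 2 ^ k := by
  have h := wdtGo_spec n (n + 1) 0 0 le_rfl (by simp; omega)
  simp only [pow_zero] at h
  rw [what_degree_two, h]
  constructor
  · intro h1
    rintro ⟨k, hk⟩
    exact h1 ⟨k, Nat.zero_le k, hk⟩
  · rintro h1 ⟨k, _, hk⟩
    exact h1 ⟨k, hk⟩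

theorem char_between_iff (c : Char) : ('0' ≤ c ∧ c ≤ '1') ↔ (c = '0' ∨ c = '1') := by
  constructor
  · rintro ⟨h0, h1⟩
    have hv0 : (48 : UInt32) ≤ c.val := h0
    have hv1 : c.val ≤ (49 : UInt32) := h1
    have t0 : 48 ≤ c.val.toNat := UInt32.le_iff_toNat_le.mp hv0
    have t1 : c.val.toNat ≤ 49 := UInt32.le_iff_toNat_le.mp hv1
    have : c.val.toNat = 48 ∨ c.val.toNat = 49 := by omega
    rcases this with h | h
    · left; exact Char.ext (by exact UInt32.toNat_inj.mp h)
    · right; exact Char.ext (by exact UInt32.toNat_inj.mp h)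
  · rintro (rfl | rfl) <;> exact ⟨by decide, by decide⟩

theorem checkChars_eq_all (l : List Char) :
    checkChars l = l.all (fun c => c == '0' || c == '1') := by
  induction l with
  | nil => rfl
  | cons c rest ih =>
    simp only [checkChars, List.all_cons]
    by_cases h : '0' ≤ c ∧ c ≤ '1'
    · rw [if_pos h, ih]
      rcases (char_between_iff c).mp h with rfl | rfl <;> simp
    · rw [if_neg h]
      have : ¬ (c = '0' ∨ c = '1') := fun hc => h ((char_between_iff c).mpr hc)
      push_neg at this
      simp [beq_iff_eq, this.1, this.2]

-- ===== VERDICT (by name: the statement is the Claim_ definition above) =====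
theorem check_vector_spec : Claim_equal_check_vector := by
  intro vec _
  unfold Spec_check_vector check_vector check_vector_alt
  set n := vec.toList.length with hn
  by_cases h0 : n < 1
  · rw [if_pos h0]
    have : ¬ 1 ≤ n := by omega
    simp [this]
  · rw [if_neg h0]
    push_neg at h0
    have hone : decide (1 ≤ n) = true := by simpa using h0
    by_cases hd : what_degree_two n = -1
    · rw [if_pos hd]
      have hnp := (what_degree_two_eq_neg_one_iff n).mp hd
      have : ¬ (n &&& (n - 1) = 0) := fun hz => hnp ((land_pred_eq_zero_iff n h0).mp hz)
      simp [hone, this]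
    · rw [if_neg hd]
      have hp : ∃ k, n = 2 ^ k := by
        by_contra hc
        exact hd ((what_degree_two_eq_neg_one_iff n).mpr hc)
      have hz : n &&& (n - 1) = 0 := (land_pred_eq_zero_iff n h0).mpr hp
      rw [checkChars_eq_all]
      simp [hone, hz]
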